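-- pv_equiv track=rewrite | github.com/pypi-data/pypi-mirror-380 | packages/clado-observe/clado_observe-0.1.1.tar.gz/clado_observe-0.1.1/src/clado_observe/utils/vlm_evaluator.py | prepare_logs_summary
-- ===== SOURCE A (Python) =====
-- from typing import List, Optional, Tuple, TypedDict
--
-- def prepare_logs_summary(logs: List[Tuple[str, str]]) -> str:
--     """
--     Prepare a summary of logs for VLM analysis.
--
--     Args:
--         logs: List of (log_entry, log_type) tuples
--
--     Returns:
--         Formatted log summary
--     """
--     action_logs = []
--     eval_logs = []
--     tool_logs = []
--     final_logs = []
--     error_logs = []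
--     thought_logs = []
--
--     for log_entry, log_type in logs:
--         if "error" in log_entry.lower() or "failed" in log_entry.lower():
--             error_logs.append(log_entry)
--
--         if log_type == "action":
--             action_logs.append(log_entry)
--         elif log_type == "eval":
--             eval_logs.append(log_entry)
--         elif log_type == "tool":
--             tool_logs.append(log_entry)
--         elif log_type == "final":
--             final_logs.append(log_entry)
--         elif log_type == "thought":
--             thought_logs.append(log_entry)
--
--     summary = "=== Log Summary ===\n"
--
--     if final_logs:
--         summary += f"\nFINAL RESULTS ({len(final_logs)}):\n"
--         summary += "\n".join(final_logs[-3:]) + "\n"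
--
--     if error_logs:
--         summary += f"\nERRORS ({len(error_logs)}):\n"
--         summary += "\n".join(error_logs[-5:]) + "\n"
--
--     summary += f"\nACTIONS TAKEN ({len(action_logs)}):\n"
--     summary += "\n".join(action_logs[-10:]) + "\n"
--
--     summary += f"\nEVALUATIONS ({len(eval_logs)}):\n"
--     summary += "\n".join(eval_logs[-5:]) + "\n"
--
--     return summary
-- ===== SOURCE B (Python) =====
-- from typing import List, Tuple
--
-- def _is_err(entry: str) -> bool:
--     lo = entry.lower()
--     return "error" in lo or "failed" in lo
--
-- def _section(label: str, items: List[str], tail: int) -> str: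
--     return f"\n{label} ({len(items)}):\n" + "\n".join(items[-tail:]) + "\n"
--
-- def prepare_logs_summary(logs: List[Tuple[str, str]]) -> str:
--     def of_type(t: str) -> List[str]:
--         return [entry for entry, ty in logs if ty == t]
--
--     error_logs = [entry for entry, _ in logs if _is_err(entry)]
--     final_logs = of_type("final")
--
--     return ("=== Log Summary ===\n"
--             + (_section("FINAL RESULTS", final_logs, 3) if final_logs else "")
--             + (_section("ERRORS", error_logs, 5) if error_logs else "")
--             + _section("ACTIONS TAKEN", of_type("action"), 10)
--             + _section("EVALUATIONS", of_type("eval"), 5))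
-- ===== Notes on version B (the rewrite author's own statement) =====
-- stated objective: simpler
-- what changed: Replaces the single six-accumulator categorizing loop with independent filtering passes per category (dropping the unused tool/thought lists) and a shared section-formatting helper that emits each labeled, tail-sliced block.
import Mathlib
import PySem

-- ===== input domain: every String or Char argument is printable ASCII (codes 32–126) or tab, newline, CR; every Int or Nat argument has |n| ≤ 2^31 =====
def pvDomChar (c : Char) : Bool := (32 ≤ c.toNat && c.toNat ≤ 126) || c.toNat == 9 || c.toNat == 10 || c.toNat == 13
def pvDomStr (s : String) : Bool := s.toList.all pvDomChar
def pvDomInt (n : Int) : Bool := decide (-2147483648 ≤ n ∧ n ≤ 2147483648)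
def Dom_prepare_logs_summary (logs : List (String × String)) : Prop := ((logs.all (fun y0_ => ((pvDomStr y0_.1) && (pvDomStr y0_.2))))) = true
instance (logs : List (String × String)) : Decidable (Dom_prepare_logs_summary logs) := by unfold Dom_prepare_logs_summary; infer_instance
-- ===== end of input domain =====

-- B is simpler: independent filtering passes per category plus one section-formatting helper,
-- instead of A's single loop threading six accumulator lists (two of them unused).

-- ===== PORT A =====
-- A's loop state: (action_logs, eval_logs, tool_logs, final_logs, error_logs, thought_logs)
def pvStepA (st : List String × List String × List String × List String × List String × List String)
    (p : String × String) :
    List String × List String × List String × List String × List String × List String :=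
  let (action, evalL, tool, finalL, err, thought) := st
  let err := if PySem.Str.isIn "error" (PySem.Str.lower p.1) || PySem.Str.isIn "failed" (PySem.Str.lower p.1)
             then err ++ [p.1] else err
  if p.2 == "action" then (action ++ [p.1], evalL, tool, finalL, err, thought)
  else if p.2 == "eval" then (action, evalL ++ [p.1], tool, finalL, err, thought)
  else if p.2 == "tool" then (action, evalL, tool ++ [p.1], finalL, err, thought)
  else if p.2 == "final" then (action, evalL, tool, finalL ++ [p.1], err, thought)
  else if p.2 == "thought" then (action, evalL, tool, finalL, err, thought ++ [p.1])
  else (action, evalL, tool, finalL, err, thought)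

def prepare_logs_summary (logs : List (String × String)) : String :=
  let st := logs.foldl pvStepA ([], [], [], [], [], [])
  let (action, evalL, _tool, finalL, err, _thought) := st
  let summary := "=== Log Summary ===\n"
  let summary := if finalL.isEmpty then summary else
    summary ++ "\nFINAL RESULTS (" ++ PySem.Int.toStr (finalL.length : Int) ++ "):\n"
      ++ PySem.Str.join "\n" (PySem.List.slice finalL (some (-3)) none) ++ "\n"
  let summary := if err.isEmpty then summary else
    summary ++ "\nERRORS (" ++ PySem.Int.toStr (err.length : Int) ++ "):\n"
      ++ PySem.Str.join "\n" (PySem.List.slice err (some (-5)) none) ++ "\n"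
  let summary := summary ++ "\nACTIONS TAKEN (" ++ PySem.Int.toStr (action.length : Int) ++ "):\n"
      ++ PySem.Str.join "\n" (PySem.List.slice action (some (-10)) none) ++ "\n"
  let summary := summary ++ "\nEVALUATIONS (" ++ PySem.Int.toStr (evalL.length : Int) ++ "):\n"
      ++ PySem.Str.join "\n" (PySem.List.slice evalL (some (-5)) none) ++ "\n"
  summary

-- ===== PORT B =====
def pvIsErr (entry : String) : Bool :=
  let lo := PySem.Str.lower entry
  PySem.Str.isIn "error" lo || PySem.Str.isIn "failed" lo

def pvSection (label : String) (items : List String) (tail : Int) : String :=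
  "\n" ++ label ++ " (" ++ PySem.Int.toStr (items.length : Int) ++ "):\n"
    ++ PySem.Str.join "\n" (PySem.List.slice items (some (-tail)) none) ++ "\n"

def pvOfType (logs : List (String × String)) (t : String) : List String :=
  (logs.filter (fun p => p.2 == t)).map Prod.fst

def prepare_logs_summary_alt (logs : List (String × String)) : String :=
  let error_logs := (logs.filter (fun p => pvIsErr p.1)).map Prod.fst
  let final_logs := pvOfType logs "final"
  "=== Log Summary ===\n"
    ++ (if final_logs.isEmpty then "" else pvSection "FINAL RESULTS" final_logs 3)
    ++ (if error_logs.isEmpty then "" else pvSection "ERRORS" error_logs 5)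
    ++ pvSection "ACTIONS TAKEN" (pvOfType logs "action") 10
    ++ pvSection "EVALUATIONS" (pvOfType logs "eval") 5

-- ===== PRECONDITION & SPEC =====
def Spec_prepare_logs_summary (logs : List (String × String)) (out : String) : Prop := out = prepare_logs_summary_alt logs
instance (logs : List (String × String)) (out : String) : Decidable (Spec_prepare_logs_summary logs out) := by unfold Spec_prepare_logs_summary; infer_instance

-- ===== CLAIM (what is proved, stated in full; the proofs are below) =====
def Claim_equal_prepare_logs_summary : Prop := ∀ (logs : List (String × String)), Dom_prepare_logs_summary logs → Spec_prepare_logs_summary logs (prepare_logs_summary logs)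

-- ===== LEMMAS AND PROOFS =====
-- A's fold over the six accumulators equals B's independent filters, appended to the start state.
theorem foldl_stepA (logs : List (String × String))
    (a e t f er th : List String) :
    logs.foldl pvStepA (a, e, t, f, er, th) =
      (a ++ pvOfType logs "action", e ++ pvOfType logs "eval", t ++ pvOfType logs "tool",
       f ++ pvOfType logs "final",
       er ++ (logs.filter (fun p => pvIsErr p.1)).map Prod.fst,
       th ++ pvOfType logs "thought") := by
  induction logs generalizing a e t f er th with
  | nil => simp [pvOfType]
  | cons p rest ih =>
    simp only [List.foldl_cons, pvStepA, pvIsErr, pvOfType, List.filter_cons]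
    split_ifs <;> simp_all [pvOfType, pvIsErr]

theorem prepare_logs_summary_eq (logs : List (String × String)) :
    prepare_logs_summary logs = prepare_logs_summary_alt logs := by
  unfold prepare_logs_summary prepare_logs_summary_alt
  rw [foldl_stepA]
  simp only [List.nil_append]
  split_ifs <;>
  · apply String.toList_injective
    simp [pvSection, String.toList_append]

-- ===== VERDICT (by name: the statement is the Claim_ definition above) =====
theorem prepare_logs_summary_spec : Claim_equal_prepare_logs_summary := by
  intro logs _
  exact prepare_logs_summary_eq logs
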